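-- pv_equiv track=rewrite | github.com/yukioishi-eng/python-practice | basics/check_none_result.py | max_pass_score
-- ===== SOURCE A (Python) =====
-- def max_pass_score(scores):
--     passed=[]
--     for s in scores:
--         if s>=60:
--             passed.append(s)
--
--     #60点以上がないとき、Noneを返す
--     if len(passed)==0:
--         return None
--
--     else:
--         max_number=passed[0]
--         for p in passed:
--             if p>max_number:
--                 max_number=p
--         return max_number
-- ===== SOURCE B (Python) =====
-- def max_pass_score(scores):
--     best = None
--     for s in scores:
--         if s >= 60:
--             if best is None or s > best:
--                 best = s
--     return best
-- ===== Notes on version B (the rewrite author's own statement) =====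
-- stated objective: simpler
-- what changed: Single pass with a running Optional maximum replaces building an intermediate filtered list and rescanning it for the max.
import Mathlib
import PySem

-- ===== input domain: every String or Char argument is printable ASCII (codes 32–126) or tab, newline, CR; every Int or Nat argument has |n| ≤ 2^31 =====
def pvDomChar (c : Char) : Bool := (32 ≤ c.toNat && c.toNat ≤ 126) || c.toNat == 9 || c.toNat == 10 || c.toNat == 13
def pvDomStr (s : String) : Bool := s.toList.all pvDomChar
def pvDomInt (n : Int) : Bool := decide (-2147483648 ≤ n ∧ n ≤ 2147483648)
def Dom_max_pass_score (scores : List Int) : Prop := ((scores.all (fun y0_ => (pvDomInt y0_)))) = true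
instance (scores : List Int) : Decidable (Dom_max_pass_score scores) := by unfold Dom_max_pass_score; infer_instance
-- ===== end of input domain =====

-- ===== PORT A =====
-- B fuses A's two passes (filter into a list, then rescan for the max) into one
-- traversal carrying a running Option Int maximum.
def max_pass_score (scores : List Int) : Option Int :=
  match scores.foldl (fun acc s => if s ≥ 60 then acc ++ [s] else acc) [] with
  | [] => none
  | p0 :: rest =>
      some ((p0 :: rest).foldl (fun m p => if p > m then p else m) p0)

-- ===== PORT B =====
def max_pass_score_alt (scores : List Int) : Option Int :=
  scores.foldl (fun best s =>
    if s ≥ 60 then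
      match best with
      | none => some s
      | some b => if s > b then some s else some b
    else best) none

-- ===== PRECONDITION & SPEC =====
def Spec_max_pass_score (scores : List Int) (out : Option Int) : Prop := out = max_pass_score_alt scores
instance (scores : List Int) (out : Option Int) : Decidable (Spec_max_pass_score scores out) := by unfold Spec_max_pass_score; infer_instance

-- ===== CLAIM (what is proved, stated in full; the proofs are below) =====
def Claim_equal_max_pass_score : Prop := ∀ (scores : List Int), Dom_max_pass_score scores → Spec_max_pass_score scores (max_pass_score scores)

-- ===== LEMMAS AND PROOFS =====

-- ===== VERDICT (by name: the statement is the Claim_ definition above) =====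
lemma build_eq_filter (l : List Int) (acc : List Int) :
    l.foldl (fun acc s => if s ≥ 60 then acc ++ [s] else acc) acc
      = acc ++ l.filter (fun s => decide (s ≥ 60)) := by
  induction l generalizing acc with
  | nil => simp
  | cons s t ih =>
    by_cases h : s ≥ 60 <;> simp [List.foldl, h, ih, List.filter]

lemma alt_fold_some (l : List Int) (b : Int) :
    l.foldl (fun best s =>
      if s ≥ 60 then
        match best with
        | none => some s
        | some b => if s > b then some s else some b
      else best) (some b)
    = some ((l.filter (fun s => decide (s ≥ 60))).foldl
        (fun m p => if p > m then p else m) b) := by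
  induction l generalizing b with
  | nil => simp
  | cons s t ih =>
    by_cases h : s ≥ 60 <;>
      simp [List.foldl, h, ih, List.filter] <;> split <;> simp [ih]

lemma alt_fold_none (l : List Int) :
    l.foldl (fun best s =>
      if s ≥ 60 then
        match best with
        | none => some s
        | some b => if s > b then some s else some b
      else best) none
    = match l.filter (fun s => decide (s ≥ 60)) with
      | [] => none
      | h :: t => some (t.foldl (fun m p => if p > m then p else m) h) := by
  induction l with
  | nil => simp
  | cons s t ih =>
    by_cases h : s ≥ 60 <;>
      simp [List.foldl, h, List.filter, ih, alt_fold_some]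

-- ===== VERDICT (by name: the statement is the Claim_ definition above) =====
theorem max_pass_score_spec : Claim_equal_max_pass_score := by
  intro scores _
  unfold Spec_max_pass_score max_pass_score max_pass_score_alt
  rw [build_eq_filter, alt_fold_none]
  simp only [List.nil_append]
  cases h : scores.filter (fun s => decide (s ≥ 60)) with
  | nil => rfl
  | cons p0 rest => simp [List.foldl]
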